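-- pv_equiv track=rewrite | github.com/randovania/randovania | randovania/layout/permalink.py | rotate_bytes
-- ===== SOURCE A (Python) =====
-- import operator
-- from typing import Iterator, Tuple, Dict, Iterable
--
-- def rotate_bytes(data: Iterable[int], rotation: int, per_byte_adjustment: int,
--                  inverse: bool = False) -> Iterator[int]:
--     """
--     Rotates the elements in data, in a reversible operation.
--     :param data: The byte values to rotate. Should be ints in the [0, 255] range.
--     :param rotation: By how much each item should be rotated, mod 256.
--     :param per_byte_adjustment: Increment the rotation by this after each byte, mod 256.
--     :param inverse: If True, it performs the inverse operation.
--     :return: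
--     """
--     if inverse:
--         op = operator.sub
--     else:
--         op = operator.add
--     for b in data:
--         yield op(b, rotation) % 256
--         rotation = (rotation + per_byte_adjustment) % 256
-- ===== SOURCE B (Python) =====
-- import operator
--
-- def rotate_bytes(data, rotation, per_byte_adjustment, inverse=False):
--     """Same rotation, but each byte's offset is computed in closed form from
--     its index instead of maintaining a running mod-256 accumulator."""
--     op = operator.sub if inverse else operator.add
--     for i, b in enumerate(data):
--         yield op(b, rotation + i * per_byte_adjustment) % 256
-- ===== Notes on version B (the rewrite author's own statement) =====
-- stated objective: alternative
-- what changed: Replaced the running, mod-256-updated rotation accumulator with a closed-form per-index offset rotation + i*per_byte_adjustment computed via enumerate.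
import Mathlib
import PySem

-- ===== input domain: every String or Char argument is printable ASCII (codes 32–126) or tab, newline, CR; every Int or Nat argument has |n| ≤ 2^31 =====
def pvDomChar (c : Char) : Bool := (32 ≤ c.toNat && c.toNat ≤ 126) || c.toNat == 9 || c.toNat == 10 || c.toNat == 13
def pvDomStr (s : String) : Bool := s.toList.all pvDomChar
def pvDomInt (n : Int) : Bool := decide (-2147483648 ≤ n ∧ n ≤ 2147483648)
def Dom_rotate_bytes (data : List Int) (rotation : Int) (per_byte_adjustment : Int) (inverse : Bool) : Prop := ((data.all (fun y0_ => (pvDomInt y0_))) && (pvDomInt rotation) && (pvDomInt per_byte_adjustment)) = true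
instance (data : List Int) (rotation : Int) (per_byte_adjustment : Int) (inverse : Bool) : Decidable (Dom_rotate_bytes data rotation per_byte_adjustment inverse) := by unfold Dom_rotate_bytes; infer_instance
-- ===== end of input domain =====

-- B replaces A's running mod-256 rotation accumulator by a closed-form per-index
-- offset (rotation + i * per_byte_adjustment) over enumerate(data); alternative
-- decomposition, same cost.

-- ===== PORT A =====
-- A: generator keeping a running `rotation` state, updated mod 256 after each byte.
def rotate_bytes (data : List Int) (rotation : Int) (per_byte_adjustment : Int) (inverse : Bool) : List Int :=
  match data with
  | [] => []
  | b :: rest =>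
      (if inverse then PySem.Int.mod (b - rotation) 256 else PySem.Int.mod (b + rotation) 256)
        :: rotate_bytes rest (PySem.Int.mod (rotation + per_byte_adjustment) 256) per_byte_adjustment inverse

-- ===== PORT B =====
-- B: map over enumerate(data); offset for index i is rotation + i * per_byte_adjustment.
def rotate_bytes_alt (data : List Int) (rotation : Int) (per_byte_adjustment : Int) (inverse : Bool) : List Int :=
  (PySem.List.enumerate data).map (fun p =>
    if inverse then PySem.Int.mod (p.2 - (rotation + p.1 * per_byte_adjustment)) 256
    else PySem.Int.mod (p.2 + (rotation + p.1 * per_byte_adjustment)) 256)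

-- ===== PRECONDITION & SPEC =====
def Spec_rotate_bytes (data : List Int) (rotation : Int) (per_byte_adjustment : Int) (inverse : Bool) (out : List Int) : Prop := out = rotate_bytes_alt data rotation per_byte_adjustment inverse
instance (data : List Int) (rotation : Int) (per_byte_adjustment : Int) (inverse : Bool) (out : List Int) : Decidable (Spec_rotate_bytes data rotation per_byte_adjustment inverse out) := by unfold Spec_rotate_bytes; infer_instance

-- ===== CLAIM (what is proved, stated in full; the proofs are below) =====
def Claim_equal_rotate_bytes : Prop := ∀ (data : List Int) (rotation : Int) (per_byte_adjustment : Int) (inverse : Bool), Dom_rotate_bytes data rotation per_byte_adjustment inverse → Spec_rotate_bytes data rotation per_byte_adjustment inverse (rotate_bytes data rotation per_byte_adjustment inverse)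

-- ===== LEMMAS AND PROOFS =====

-- Loop invariant: A's running state r agrees mod 256 with the closed-form offset
-- c + s * adj at the current enumerate index s.
theorem rotate_aux (adj : Int) (inv : Bool) :
    ∀ (data : List Int) (s r c : Int), r % 256 = (c + s * adj) % 256 →
      rotate_bytes data r adj inv =
        (PySem.List.enumerate data s).map (fun p =>
          if inv then PySem.Int.mod (p.2 - (c + p.1 * adj)) 256
          else PySem.Int.mod (p.2 + (c + p.1 * adj)) 256)
  | [], s, r, c, h => by simp [rotate_bytes]
  | b :: rest, s, r, c, h => by
      rw [PySem.List.enumerate_cons]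
      have hmod : ∀ x : Int, PySem.Int.mod x 256 = x % 256 :=
        fun x => PySem.Int.mod_eq_emod_of_pos (by norm_num)
      have htail := rotate_aux adj inv rest (s + 1) (PySem.Int.mod (r + adj) 256) c
        (by
          rw [hmod]
          have hexp : c + (s + 1) * adj = (c + s * adj) + adj := by ring
          rw [hexp]
          generalize c + s * adj = t at h ⊢
          omega)
      simp only [rotate_bytes, List.map_cons, htail]
      congr 1
      cases inv <;> simp only [if_false, if_true, hmod, Bool.false_eq_true] <;>
        · generalize c + s * adj = t at h ⊢
          omega

-- ===== VERDICT (by name: the statement is the Claim_ definition above) =====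
theorem rotate_bytes_spec : Claim_equal_rotate_bytes := by
  intro data rotation adj inv _
  unfold Spec_rotate_bytes rotate_bytes_alt
  exact rotate_aux adj inv data 0 rotation rotation (by ring_nf)
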